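-- pv_equiv track=rewrite | github.com/kyungminlee/fortran-migrator | src-multifloats/pyengine/fortran_migrator.py | reformat_fixed_line
-- ===== SOURCE A (Python) =====
-- def is_comment_line(line: str) -> bool:
--     return bool(line) and line[0] in ('C', 'c', '*', '!')
--
-- def _build_split_mask(body: str) -> list[bool]:
--     mask = [True] * len(body)
--     in_string, quote_char, i = False, '', 0
--     while i < len(body):
--         ch = body[i]
--         if in_string:
--             mask[i] = False
--             if ch == quote_char:
--                 if i + 1 < len(body) and body[i + 1] == quote_char:
--                     mask[i + 1] = False
--                     i += 2
--                     continue
--                 in_string = False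
--         elif ch in ("'", '"'):
--             in_string, quote_char, mask[i] = True, ch, False
--         i += 1
--     return mask
--
-- def reformat_fixed_line(line: str, cont_char: str = '+') -> str:
--     if len(line) <= 72 or is_comment_line(line) or (len(line) > 6 and line[6:].lstrip().startswith('!')):
--         return line
--     prefix, body = line[:6] if len(line) >= 6 else line.ljust(6), line[6:]
--     safe = _build_split_mask(body)
--     chunks = []
--     while len(body) > 66:
--         split_pos = 66
--         for i in range(65, max(35, 65 - 30), -1):
--             if body[i] in (',', ' ') and safe[i]:
--                 split_pos = i + 1
--                 break
--         else:
--             for i in range(65, 0, -1):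
--                 if safe[i]:
--                     split_pos = i
--                     break
--         chunks.append(body[:split_pos])
--         body, safe = body[split_pos:], safe[split_pos:]
--     chunks.append(body)
--     result_lines = [prefix + chunks[0]]
--     for chunk in chunks[1:]: result_lines.append('     ' + cont_char + chunk)
--     return '\n'.join(result_lines)
-- ===== SOURCE B (Python) =====
-- def reformat_fixed_line(line: str, cont_char: str = '+') -> str:
--     if len(line) <= 72 or (line != '' and line[0] in ('C', 'c', '*', '!')) \
--             or (len(line) > 6 and line[6:].lstrip().startswith('!')):
--         return line
--     prefix = line[:6] if len(line) >= 6 else line.ljust(6)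
--     body = line[6:]
--     n = len(body)
--     # one forward pass: string-state machine computes the safe flags inline,
--     # while running "last seen break" pointers replace A's per-chunk backward scans.
--     safe = []
--     in_string, quote, pending = False, '', False
--     for i in range(n):
--         ch = body[i]
--         if pending:
--             safe.append(False)
--             pending = False
--         elif in_string:
--             safe.append(False)
--             if ch == quote:
--                 if i + 1 < n and body[i + 1] == quote:
--                     pending = True
--                 else:
--                     in_string = False
--         elif ch in ("'", '"'):
--             safe.append(False)
--             in_string, quote = True, ch
--         else:
--             safe.append(True)
--     pieces = []
--     start = 0
--     best_cs = None   # last safe ','/' ' at chunk offset >= 36 (absolute index)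
--     best_safe = None  # last safe position at chunk offset >= 1 (absolute index)
--     for i in range(n):
--         if i - start == 66:
--             if best_cs is not None:
--                 p = best_cs + 1
--             elif best_safe is not None:
--                 p = best_safe
--             else:
--                 p = start + 66
--             pieces.append(body[start:p])
--             start = p
--             best_cs = best_safe = None
--             for j in range(p + 1, i):
--                 if safe[j]:
--                     best_safe = j
--                     if body[j] in (',', ' ') and j - p >= 36:
--                         best_cs = j
--         if safe[i] and i - start >= 1:
--             best_safe = i
--             if body[i] in (',', ' ') and i - start >= 36:
--                 best_cs = i
--     pieces.append(body[start:])
--     out = [prefix + pieces[0]]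
--     for c in pieces[1:]:
--         out.append('     ' + cont_char + c)
--     return '\n'.join(out)
-- ===== Notes on version B (the rewrite author's own statement) =====
-- stated objective: alternative
-- what changed: B replaces A's precomputed split mask plus per-chunk backward scans and repeated body/mask reslicing by a single forward pass that computes the string-state flags inline and keeps running last-seen break pointers, emitting cut positions as it goes.
import Mathlib
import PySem

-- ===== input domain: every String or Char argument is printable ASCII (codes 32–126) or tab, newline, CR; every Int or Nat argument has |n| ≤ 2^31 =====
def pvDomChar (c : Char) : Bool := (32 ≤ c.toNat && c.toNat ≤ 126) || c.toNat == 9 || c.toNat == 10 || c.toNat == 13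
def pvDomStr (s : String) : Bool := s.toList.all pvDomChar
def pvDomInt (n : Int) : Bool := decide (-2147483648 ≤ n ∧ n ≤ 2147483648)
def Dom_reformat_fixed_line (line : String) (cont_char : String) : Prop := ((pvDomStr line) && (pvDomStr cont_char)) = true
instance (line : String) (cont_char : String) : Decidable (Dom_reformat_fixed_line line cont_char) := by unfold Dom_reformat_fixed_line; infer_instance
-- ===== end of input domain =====

-- B replaces A's precomputed split mask and per-chunk backward scans + list reslicing by one
-- forward pass that computes the string-state inline and keeps running "last break seen" pointers.
-- All integer quantities in both programs are nonnegative, so Nat indices are exact here.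

-- ===== PORT A =====

-- line[0] in ('C', 'c', '*', '!')
def pvIsCommentLine (l : List Char) : Bool :=
  match l with
  | [] => false
  | c :: _ => c == 'C' || c == 'c' || c == '*' || c == '!'

-- _build_split_mask's while loop; state (mask, in_string, quote_char, i); quote_char's Python
-- initial value '' is never compared before being set, the initial Char here is arbitrary (' ').
def pvMaskA (body : List Char) (mask : List Bool) (in_string : Bool) (quote : Char) (i : Nat) :
    List Bool :=
  if h : i < body.length then
    let ch := body[i]
    if in_string then
      let mask1 := mask.set i false
      if ch == quote then
        if decide (i + 1 < body.length) && (body.getD (i+1) ' ' == quote) then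
          pvMaskA body (mask1.set (i+1) false) in_string quote (i+2)
        else
          pvMaskA body mask1 false quote (i+1)
      else
        pvMaskA body mask1 in_string quote (i+1)
    else if ch == '\'' || ch == '"' then
      pvMaskA body (mask.set i false) true ch (i+1)
    else
      pvMaskA body mask in_string quote (i+1)
  else mask
termination_by body.length - i

-- the two backward for-loops with break/else; range(65, max(35, 65-30), -1) and range(65, 0, -1)
def pvFindBreakA (body : List Char) (safe : List Bool) : Nat :=
  match (List.range' 36 30).reverse.find?
      (fun i => (body.getD i ' ' == ',' || body.getD i ' ' == ' ') && safe.getD i false) with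
  | some i => i + 1
  | none =>
    match (List.range' 1 65).reverse.find? (fun i => safe.getD i false) with
    | some i => i
    | none => 66

theorem pvFindBreakA_pos (body : List Char) (safe : List Bool) : 1 ≤ pvFindBreakA body safe := by
  unfold pvFindBreakA
  split
  · omega
  · split
    · next i h =>
      have := List.mem_of_find?_eq_some h
      simp [List.mem_range'] at this
      omega
    · omega

-- the `while len(body) > 66` loop; body and safe are resliced each turn exactly as in A
def pvChunksA (body : List Char) (safe : List Bool) : List (List Char) :=
  if h : 66 < body.length then
    let sp := pvFindBreakA body safe
    body.take sp :: pvChunksA (body.drop sp) (safe.drop sp)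
  else [body]
termination_by body.length
decreasing_by
  have := pvFindBreakA_pos body safe
  simp only [List.length_drop]
  omega

def reformat_fixed_line (line : String) (cont_char : String) : String :=
  let l := line.toList
  if l.length ≤ 72 || pvIsCommentLine l
      || (decide (6 < l.length) && PySem.Chars.startswith (PySem.Chars.lstrip (l.drop 6)) ['!']) then
    line
  else
    -- line[:6] / line[6:] with nonnegative bounds are take/drop; ljust(6) pads with spaces
    let pre := if 6 ≤ l.length then l.take 6 else l ++ List.replicate (6 - l.length) ' '
    let body := l.drop 6
    let safe := pvMaskA body (List.replicate body.length true) false ' ' 0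
    let chunks := pvChunksA body safe
    let result_lines := (pre ++ chunks.headD [])
      :: (chunks.drop 1).map (fun c => [' ', ' ', ' ', ' ', ' '] ++ cont_char.toList ++ c)
    String.ofList (PySem.Chars.join ['\n'] result_lines)

-- ===== PORT B =====

-- B's forward string-state pass: per-character step with a `pending` flag for the doubled quote
def pvMaskB (body : List Char) (in_string : Bool) (quote : Char) (pending : Bool) : List Bool :=
  match body with
  | [] => []
  | ch :: rest =>
    if pending then
      false :: pvMaskB rest in_string quote false
    else if in_string then
      false ::
        (if ch == quote then
          if rest.head? == some quote then pvMaskB rest in_string quote true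
          else pvMaskB rest false quote false
        else pvMaskB rest in_string quote false)
    else if ch == '\'' || ch == '"' then
      false :: pvMaskB rest true ch false
    else
      true :: pvMaskB rest in_string quote false

-- B's single chunking loop `for i in range(n)` with running break pointers
def pvLoopB (body : List Char) (safe : List Bool) (i start : Nat) (bcs bsafe : Option Nat)
    (pieces : List (List Char)) : List (List Char) :=
  if h : i < body.length then
    let st :=
      if i - start == 66 then
        let p := match bcs with
          | some c => c + 1
          | none => match bsafe with
            | some s => s
            | none => start + 66
        let pieces2 := pieces ++ [(body.drop start).take (p - start)]
        let nb := (List.range' (p+1) (i - (p+1))).foldl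
          (fun (acc : Option Nat × Option Nat) j =>
            if safe.getD j false then
              (if (body.getD j ' ' == ',' || body.getD j ' ' == ' ') && decide (36 ≤ j - p)
                then some j else acc.1,
               some j)
            else acc) (none, none)
        (p, nb.1, nb.2, pieces2)
      else (start, bcs, bsafe, pieces)
    if safe.getD i false && decide (1 ≤ i - st.1) then
      pvLoopB body safe (i+1) st.1
        (if (body.getD i ' ' == ',' || body.getD i ' ' == ' ') && decide (36 ≤ i - st.1)
          then some i else st.2.1)
        (some i) st.2.2.2
    else
      pvLoopB body safe (i+1) st.1 st.2.1 st.2.2.1 st.2.2.2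
  else pieces ++ [body.drop start]
termination_by body.length - i

def reformat_fixed_line_alt (line : String) (cont_char : String) : String :=
  let l := line.toList
  if l.length ≤ 72
      || (!l.isEmpty && (['C', 'c', '*', '!'].contains (l.headD ' ')))
      || (decide (6 < l.length) && PySem.Chars.startswith (PySem.Chars.lstrip (l.drop 6)) ['!']) then
    line
  else
    let pre := if 6 ≤ l.length then l.take 6 else l ++ List.replicate (6 - l.length) ' '
    let body := l.drop 6
    let safe := pvMaskB body false ' ' false
    let pieces := pvLoopB body safe 0 0 none none []
    let out := (pre ++ pieces.headD [])
      :: (pieces.drop 1).map (fun c => [' ', ' ', ' ', ' ', ' '] ++ cont_char.toList ++ c)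
    String.ofList (PySem.Chars.join ['\n'] out)

-- ===== PRECONDITION & SPEC =====
def Spec_reformat_fixed_line (line : String) (cont_char : String) (out : String) : Prop := out = reformat_fixed_line_alt line cont_char
instance (line : String) (cont_char : String) (out : String) : Decidable (Spec_reformat_fixed_line line cont_char out) := by unfold Spec_reformat_fixed_line; infer_instance

-- ===== CLAIM (what is proved, stated in full; the proofs are below) =====
def Claim_equal_reformat_fixed_line : Prop := ∀ (line : String) (cont_char : String), Dom_reformat_fixed_line line cont_char → Spec_reformat_fixed_line line cont_char (reformat_fixed_line line cont_char)

-- ===== LEMMAS AND PROOFS =====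

theorem set_take_succ {α : Type} (l : List α) (i : Nat) (a : α) (h : i < l.length) :
    (l.set i a).take (i+1) = l.take i ++ [a] := by
  rw [List.set_eq_take_cons_drop a h, List.take_append]
  have hl : (l.take i).length = i := by simp; omega
  simp [hl, List.take_take]

theorem getElem_true_of_drop_replicate (l : List Bool) (i n : Nat)
    (h : l.drop i = List.replicate n true) (hn : 0 < n) (hi : i < l.length) : l[i] = true := by
  have h0 : (l.drop i)[0]? = some true := by rw [h]; simp [List.getElem?_replicate]; omega
  rw [List.getElem?_drop] at h0
  simpa [List.getElem?_eq_getElem hi] using h0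

theorem maskA_eq_maskB (body : List Char) :
    ∀ (fuel i : Nat) (mask : List Bool) (s : Bool) (q : Char),
    body.length - i ≤ fuel →
    mask.length = body.length →
    mask.drop i = List.replicate (body.length - i) true →
    pvMaskA body mask s q i = mask.take i ++ pvMaskB (body.drop i) s q false := by
  intro fuel
  induction fuel with
  | zero =>
    intro i mask s q hfuel hlen hsuf
    have hge : body.length ≤ i := by omega
    rw [pvMaskA, dif_neg (by omega), List.drop_eq_nil_of_le hge]
    simp [pvMaskB, List.take_of_length_le (show mask.length ≤ i by omega)]
  | succ fuel ih =>
    intro i mask s q hfuel hlen hsuf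
    by_cases h : i < body.length
    · have hdropb : body.drop i = body[i] :: body.drop (i+1) := List.drop_eq_getElem_cons h
      have hd1 : mask.drop (i+1) = List.replicate (body.length - (i+1)) true := by
        have h2 := congrArg (List.drop 1) hsuf
        simpa [List.drop_drop, List.drop_replicate, Nat.add_comm,
          show body.length - i - 1 = body.length - (i+1) from by omega] using h2
      have hi1 : i < mask.length := by omega
      have hd2 : mask.drop (i+2) = List.replicate (body.length - (i+2)) true := by
        have h2 := congrArg (List.drop 1) hd1
        simpa [List.drop_drop, List.drop_replicate, Nat.add_comm,
          show 1 + (i+1) = i+2 from by omega,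
          show body.length - (i+1) - 1 = body.length - (i+2) from by omega] using h2
      have hslen : (mask.set i false).length = body.length := by simpa using hlen
      have hsd1 : (mask.set i false).drop (i+1) = List.replicate (body.length - (i+1)) true := by
        rw [List.drop_set_of_lt (by omega)]; exact hd1
      have htk : (mask.set i false).take (i+1) = mask.take i ++ [false] := set_take_succ _ _ _ hi1
      rw [pvMaskA, dif_pos h, hdropb]
      cases s with
      | true =>
        simp only [if_pos rfl]
        by_cases hq : body[i] == q
        · rw [if_pos hq]
          by_cases hdq : (decide (i + 1 < body.length) && (body.getD (i+1) ' ' == q)) = true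
          · rw [if_pos hdq]
            have h2 : i + 1 < body.length := by
              rcases Bool.and_eq_true_iff.mp hdq with ⟨hd, _⟩; exact of_decide_eq_true hd
            have hbq : body[i+1] = q := by
              rcases Bool.and_eq_true_iff.mp hdq with ⟨_, hd⟩
              have hgd : body.getD (i+1) ' ' = q := beq_iff_eq.mp hd
              rw [List.getD_eq_getElem?_getD, List.getElem?_eq_getElem h2] at hgd
              simpa using hgd
            have hssd : ((mask.set i false).set (i+1) false).drop (i+2)
                = List.replicate (body.length - (i+2)) true := by
              rw [List.drop_set_of_lt (by omega), List.drop_set_of_lt (by omega)]; exact hd2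
            rw [ih (i+2) _ true q (by omega) (by simpa using hlen) hssd]
            have hdropb2 : body.drop (i+1) = body[i+1] :: body.drop (i+2) :=
              List.drop_eq_getElem_cons h2
            rw [pvMaskB]
            simp only [if_neg Bool.false_ne_true, if_pos rfl, if_pos hq]
            rw [hdropb2]
            simp only [List.head?_cons, hbq, beq_self_eq_true, if_pos rfl]
            rw [pvMaskB]
            simp only [if_pos rfl]
            rw [set_take_succ _ _ _ (show i+1 < (mask.set i false).length by simp; omega), htk]
            simp
          · rw [if_neg hdq]
            rw [ih (i+1) _ false q (by omega) hslen hsd1, htk]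
            rw [pvMaskB]
            simp only [if_neg Bool.false_ne_true, if_pos rfl, if_pos hq]
            have hhd : ((body.drop (i+1)).head? == some q) = false := by
              by_cases h2 : i + 1 < body.length
              · have hne : ¬ (body.getD (i+1) ' ' == q) = true := by
                  intro hc; exact hdq (Bool.and_eq_true_iff.mpr ⟨decide_eq_true h2, hc⟩)
                rw [List.drop_eq_getElem_cons h2]
                simp only [List.head?_cons]
                simp only [List.getD, List.getElem?_eq_getElem h2, Option.getD_some] at hne
                simpa using hne
              · rw [List.drop_eq_nil_of_le (by omega)]; rfl
            rw [hhd]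
            simp
        · rw [if_neg hq]
          rw [ih (i+1) _ true q (by omega) hslen hsd1, htk]
          rw [pvMaskB]
          simp only [if_neg Bool.false_ne_true, if_pos rfl, if_neg hq]
          simp
      | false =>
        simp only [Bool.false_eq_true, if_neg Bool.false_ne_true]
        by_cases hq2 : (body[i] == '\'' || body[i] == '"') = true
        · rw [if_pos hq2]
          rw [ih (i+1) _ true body[i] (by omega) hslen hsd1, htk]
          rw [pvMaskB]
          simp only [if_neg Bool.false_ne_true, if_neg Bool.false_ne_true, if_pos hq2]
          simp
        · rw [if_neg hq2]
          rw [ih (i+1) _ false q (by omega) hlen hd1]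
          rw [pvMaskB]
          simp only [if_neg Bool.false_ne_true, if_neg Bool.false_ne_true, if_neg hq2]
          have hmi : mask[i] = true :=
            getElem_true_of_drop_replicate mask i _ hsuf (by omega) hi1
          have : mask.take (i+1) = mask.take i ++ [true] := by
            rw [List.take_succ, List.getElem?_eq_getElem hi1, hmi]; rfl
          rw [this]
          simp
    · rw [pvMaskA, dif_neg h, List.drop_eq_nil_of_le (show body.length ≤ i by omega)]
      simp [pvMaskB, List.take_of_length_le (show mask.length ≤ i by omega)]

theorem foldl_lastMatch_eq_find?_reverse (l : List Nat) (p : Nat → Bool) (a : Option Nat) :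
    l.foldl (fun acc j => if p j then some j else acc) a
      = match l.reverse.find? p with | some j => some j | none => a := by
  induction l generalizing a with
  | nil => simp
  | cons x t ih =>
    rw [List.foldl_cons, ih]
    simp only [List.reverse_cons, List.find?_append]
    cases hf : t.reverse.find? p with
    | some j => simp
    | none =>
      simp only [Option.none_or]
      by_cases hp : p x = true <;> simp [List.find?, hp]

theorem foldl_prod_split (l : List Nat) (g h : Option Nat → Nat → Option Nat)
    (step : Option Nat × Option Nat → Nat → Option Nat × Option Nat)
    (hstep : ∀ ab j, step ab j = (g ab.1 j, h ab.2 j)) (a b : Option Nat) :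
    l.foldl step (a, b) = (l.foldl g a, l.foldl h b) := by
  induction l generalizing a b with
  | nil => rfl
  | cons x t ih => rw [List.foldl_cons, hstep]; exact ih _ _

theorem find?_congr_mem (l : List Nat) (p q : Nat → Bool) (h : ∀ x ∈ l, p x = q x) :
    l.find? p = l.find? q := by
  induction l with
  | nil => rfl
  | cons x t ih =>
    have hx := h x (by simp)
    by_cases hp : p x = true
    · rw [List.find?_cons_of_pos hp, List.find?_cons_of_pos (hx ▸ hp)]
    · rw [List.find?_cons_of_neg hp, List.find?_cons_of_neg (hx ▸ hp),
        ih (fun y hy => h y (by simp [hy]))]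

theorem getD_drop {α : Type} (l : List α) (n o : Nat) (d : α) :
    (l.drop n).getD o d = l.getD (n + o) d := by
  simp [List.getD_eq_getElem?_getD, List.getElem?_drop]

theorem range'_reverse_find?_shift (s n k : Nat) (pred : Nat → Bool) :
    (List.range' (k+s) n).reverse.find? pred
      = ((List.range' s n).reverse.find? (fun o => pred (k+o))).map (k+·) := by
  have hmap : List.range' (k+s) n = (List.range' s n).map (k+·) := by
    rw [List.range'_eq_map_range, List.range'_eq_map_range, List.map_map]
    congr 1
    funext o
    simp [Nat.add_assoc]
  rw [hmap, ← List.map_reverse, List.find?_map]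
  rfl

theorem find?_reverse_range'_succ (a i : Nat) (pred : Nat → Bool) (hai : a ≤ i) :
    (List.range' a (i+1-a)).reverse.find? pred
      = if pred i then some i else (List.range' a (i-a)).reverse.find? pred := by
  have : List.range' a (i+1-a) = List.range' a (i-a) ++ [i] := by
    have h1 : i + 1 - a = (i - a) + 1 := by omega
    rw [h1, List.range'_concat]
    congr 2
    omega
  rw [this, List.reverse_append]
  simp only [List.reverse_singleton, List.singleton_append, List.find?_cons]
  split <;> simp_all

theorem pvFindBreakA_le (body : List Char) (safe : List Bool) : pvFindBreakA body safe ≤ 66 := by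
  unfold pvFindBreakA
  split
  · next i h =>
    have := List.mem_of_find?_eq_some h
    simp [List.mem_range'] at this
    omega
  · split
    · next i h =>
      have := List.mem_of_find?_eq_some h
      simp [List.mem_range'] at this
      omega
    · omega

theorem match_option_id (o : Option Nat) :
    (match o with | some j => some j | none => none) = o := by cases o <;> rfl

theorem find?_q1_eq_window (body : List Char) (safe : List Bool) (p i : Nat) :
    (List.range' (p+1) (i-(p+1))).reverse.find?
      (fun j => ((body.getD j ' ' == ',' || body.getD j ' ' == ' ') && decide (36 ≤ j - p))
          && safe.getD j false)
    = (List.range' (p+36) (i-(p+36))).reverse.find?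
      (fun j => (body.getD j ' ' == ',' || body.getD j ' ' == ' ') && safe.getD j false) := by
  by_cases hle : i ≤ p + 36
  · have h0 : i - (p+36) = 0 := by omega
    rw [h0]
    simp only [List.range'_zero, List.reverse_nil, List.find?_nil]
    rw [List.find?_eq_none]
    intro j hj
    simp only [List.mem_reverse, List.mem_range'] at hj
    have : ¬ (36 ≤ j - p) := by omega
    simp [this]
  · have hsplit : List.range' (p+1) (i-(p+1))
        = List.range' (p+1) 35 ++ List.range' (p+36) (i-(p+36)) := by
      have := @List.range'_append (p+1) 35 (i-(p+36)) 1
      simp only [Nat.mul_one] at this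
      rw [show i - (p+1) = 35 + (i-(p+36)) from by omega, ← this]
    rw [hsplit, List.reverse_append, List.find?_append]
    have hlow : (List.range' (p+1) 35).reverse.find?
        (fun j => ((body.getD j ' ' == ',' || body.getD j ' ' == ' ') && decide (36 ≤ j - p))
            && safe.getD j false) = none := by
      rw [List.find?_eq_none]
      intro j hj
      simp only [List.mem_reverse, List.mem_range'] at hj
      have : ¬ (36 ≤ j - p) := by omega
      simp [this]
    rw [find?_congr_mem _ _ (fun j => (body.getD j ' ' == ',' || body.getD j ' ' == ' ')
          && safe.getD j false) ?_, hlow]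
    · simp
    · intro x hx
      simp only [List.mem_reverse, List.mem_range'] at hx
      have : (36 ≤ x - p) := by omega
      simp [this]

theorem cut_break (body : List Char) (safe : List Bool) (start : Nat) :
    (match ((List.range' (start+36) 30).reverse.find?
        (fun j => (body.getD j ' ' == ',' || body.getD j ' ' == ' ') && safe.getD j false)
        : Option Nat) with
      | some c => c + 1
      | none => match ((List.range' (start+1) 65).reverse.find?
            (fun j => safe.getD j false) : Option Nat) with
        | some s => s
        | none => start + 66)
    = start + pvFindBreakA (body.drop start) (safe.drop start) := by
  rw [range'_reverse_find?_shift 36 30 start, range'_reverse_find?_shift 1 65 start]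
  have hpc : (fun o => (body.getD (start+o) ' ' == ',' || body.getD (start+o) ' ' == ' ')
        && safe.getD (start+o) false)
      = (fun o => ((body.drop start).getD o ' ' == ',' || (body.drop start).getD o ' ' == ' ')
        && (safe.drop start).getD o false) := by
    funext o; simp [getD_drop]
  have hps : (fun o => safe.getD (start+o) false)
      = (fun o => (safe.drop start).getD o false) := by
    funext o; simp [getD_drop]
  rw [hpc, hps]
  unfold pvFindBreakA
  cases hf : (List.range' 36 30).reverse.find?
      (fun o => ((body.drop start).getD o ' ' == ',' || (body.drop start).getD o ' ' == ' ')
        && (safe.drop start).getD o false) with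
  | some o =>
    simp only [hf, Option.map_some]
    rfl
  | none =>
    simp only [hf, Option.map_none]
    cases hf2 : (List.range' 1 65).reverse.find? (fun o => (safe.drop start).getD o false) with
    | some o => simp [hf2]
    | none => simp [hf2]

theorem windowS_succ (safe : List Bool) (st i : Nat) (hsi : st ≤ i) :
    (List.range' (st+1) (i+1-(st+1))).reverse.find? (fun j => safe.getD j false)
      = if safe.getD i false && decide (1 ≤ i - st) then some i
        else (List.range' (st+1) (i-(st+1))).reverse.find? (fun j => safe.getD j false) := by
  by_cases ha : st + 1 ≤ i
  · rw [find?_reverse_range'_succ (st+1) i _ ha]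
    have hd : decide (1 ≤ i - st) = true := by simp; omega
    rw [hd, Bool.and_true]
  · have hst : i = st := by omega
    subst hst
    simp

theorem windowC_succ (body : List Char) (safe : List Bool) (st i : Nat) (hsi : st ≤ i) :
    (List.range' (st+36) (i+1-(st+36))).reverse.find?
        (fun j => (body.getD j ' ' == ',' || body.getD j ' ' == ' ') && safe.getD j false)
      = if ((body.getD i ' ' == ',' || body.getD i ' ' == ' ') && decide (36 ≤ i - st))
            && safe.getD i false then some i
        else (List.range' (st+36) (i-(st+36))).reverse.find?
          (fun j => (body.getD j ' ' == ',' || body.getD j ' ' == ' ') && safe.getD j false) := by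
  by_cases ha : st + 36 ≤ i
  · rw [find?_reverse_range'_succ (st+36) i _ ha]
    have hd : decide (36 ≤ i - st) = true := by simp; omega
    rw [hd, Bool.and_true]
  · have h0 : i + 1 - (st+36) = 0 := by omega
    have h0' : i - (st+36) = 0 := by omega
    have hd : decide (36 ≤ i - st) = false := by simp; omega
    rw [h0, h0', hd]
    simp

theorem loopB_eq_chunksA (body : List Char) (safe : List Bool) :
    ∀ (fuel i start : Nat) (bcs bsafe : Option Nat) (pieces : List (List Char)),
    body.length - i ≤ fuel → start ≤ i → i ≤ body.length → i - start ≤ 66 →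
    bsafe = (List.range' (start+1) (i - (start+1))).reverse.find? (fun j => safe.getD j false) →
    bcs = (List.range' (start+36) (i - (start+36))).reverse.find?
        (fun j => (body.getD j ' ' == ',' || body.getD j ' ' == ' ') && safe.getD j false) →
    pvLoopB body safe i start bcs bsafe pieces
      = pieces ++ pvChunksA (body.drop start) (safe.drop start) := by
  intro fuel
  induction fuel with
  | zero =>
    intro i start bcs bsafe pieces hfuel hsi hin h66 hbs hbc
    rw [pvLoopB.eq_def, dif_neg (by omega), pvChunksA, dif_neg (by simp; omega)]
  | succ fuel ih =>
    intro i start bcs bsafe pieces hfuel hsi hin h66 hbs hbc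
    subst hbs
    subst hbc
    by_cases h : i < body.length
    · rw [pvLoopB.eq_def, dif_pos h]
      by_cases hcut : (i - start == 66) = true
      · -- cut fires: i = start + 66
        have hieq : i = start + 66 := by
          have : i - start = 66 := by simpa using hcut
          omega
        simp only [hcut, if_true]
        have hwin1 : i - (start + 36) = 30 := by omega
        have hwin2 : i - (start + 1) = 65 := by omega
        rw [hwin1, hwin2, cut_break body safe start]
        set sp := pvFindBreakA (body.drop start) (safe.drop start) with hspdef
        have hsp1 : 1 ≤ sp := pvFindBreakA_pos _ _
        have hsp66 : sp ≤ 66 := pvFindBreakA_le _ _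
        have hfold : ∀ (l : List Nat),
            l.foldl (fun (acc : Option Nat × Option Nat) j =>
              if safe.getD j false then
                (if (body.getD j ' ' == ',' || body.getD j ' ' == ' ')
                    && decide (36 ≤ j - (start + sp)) then some j else acc.1,
                 some j)
              else acc) (none, none)
            = (l.reverse.find? (fun j => ((body.getD j ' ' == ',' || body.getD j ' ' == ' ')
                  && decide (36 ≤ j - (start + sp))) && safe.getD j false),
               l.reverse.find? (fun j => safe.getD j false)) := by
          intro l
          rw [foldl_prod_split l
            (fun a j => if ((body.getD j ' ' == ',' || body.getD j ' ' == ' ')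
                && decide (36 ≤ j - (start + sp))) && safe.getD j false then some j else a)
            (fun b j => if safe.getD j false then some j else b) _ ?hstep none none]
          · rw [foldl_lastMatch_eq_find?_reverse, foldl_lastMatch_eq_find?_reverse,
              match_option_id, match_option_id]
          case hstep =>
            intro ab j
            obtain ⟨a1, a2⟩ := ab
            dsimp only
            by_cases h1 : safe.getD j false = true
            · by_cases h2 : ((body.getD j ' ' == ',' || body.getD j ' ' == ' ')
                  && decide (36 ≤ j - (start + sp))) = true
              · rw [if_pos h1, if_pos h2, if_pos (Bool.and_eq_true_iff.mpr ⟨h2, h1⟩),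
                  if_pos h1]
              · rw [if_pos h1, if_neg h2,
                  if_neg (fun hc => h2 (Bool.and_eq_true_iff.mp hc).1), if_pos h1]
            · rw [if_neg h1, if_neg (fun hc => h1 (Bool.and_eq_true_iff.mp hc).2),
                if_neg h1]
        rw [hfold]
        have hgt : 66 < (body.drop start).length := by simp; omega
        rw [pvChunksA, dif_pos hgt]
        simp only [← hspdef]
        have hps : start + sp ≤ i := by omega
        have hbsnew := windowS_succ safe (start + sp) i hps
        have hbcnew := windowC_succ body safe (start + sp) i hps
        have hq1 := find?_q1_eq_window body safe (start + sp) i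
        by_cases hupd : (safe.getD i false && decide (1 ≤ i - (start + sp))) = true
        · have hbs2 : (some i : Option Nat)
              = (List.range' ((start+sp)+1) (i + 1 - ((start+sp)+1))).reverse.find?
                  (fun j => safe.getD j false) := by
            rw [hbsnew, if_pos hupd]
          have hbc2 : (if (body.getD i ' ' == ',' || body.getD i ' ' == ' ')
                && decide (36 ≤ i - (start + sp))
              then some i
              else (List.range' ((start+sp)+1) (i - ((start+sp)+1))).reverse.find?
                (fun j => ((body.getD j ' ' == ',' || body.getD j ' ' == ' ')
                  && decide (36 ≤ j - (start + sp))) && safe.getD j false))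
              = (List.range' ((start+sp)+36) (i + 1 - ((start+sp)+36))).reverse.find?
                  (fun j => (body.getD j ' ' == ',' || body.getD j ' ' == ' ')
                    && safe.getD j false) := by
            rw [hq1, hbcnew]
            by_cases hc : ((body.getD i ' ' == ',' || body.getD i ' ' == ' ')
                && decide (36 ≤ i - (start + sp))) = true
            · rw [if_pos hc, if_pos (by
                rw [hc, Bool.true_and]; exact (Bool.and_eq_true_iff.mp hupd).1)]
            · rw [if_neg hc, if_neg (fun hcon => hc (Bool.and_eq_true_iff.mp hcon).1)]
          rw [if_pos hupd]
          rw [ih (i+1) (start+sp) _ _ _ (by omega) (by omega) (by omega) (by omega)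
            hbs2 hbc2]
          rw [List.drop_drop, List.drop_drop]
          simp [Nat.add_comm]
        · have hbs2 : ((List.range' ((start+sp)+1) (i - ((start+sp)+1))).reverse.find?
                  (fun j => safe.getD j false) : Option Nat)
              = (List.range' ((start+sp)+1) (i + 1 - ((start+sp)+1))).reverse.find?
                  (fun j => safe.getD j false) := by
            rw [hbsnew, if_neg hupd]
          have hnotc : ¬ (((body.getD i ' ' == ',' || body.getD i ' ' == ' ')
                && decide (36 ≤ i - (start + sp))) && safe.getD i false) = true := by
            intro hcon
            rcases Bool.and_eq_true_iff.mp hcon with ⟨h1, h2⟩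
            rcases Bool.and_eq_true_iff.mp h1 with ⟨_, h3⟩
            have h4 : 36 ≤ i - (start+sp) := of_decide_eq_true h3
            exact hupd (Bool.and_eq_true_iff.mpr ⟨h2, decide_eq_true (by omega)⟩)
          have hbc2 : ((List.range' ((start+sp)+1) (i - ((start+sp)+1))).reverse.find?
                (fun j => ((body.getD j ' ' == ',' || body.getD j ' ' == ' ')
                  && decide (36 ≤ j - (start + sp))) && safe.getD j false) : Option Nat)
              = (List.range' ((start+sp)+36) (i + 1 - ((start+sp)+36))).reverse.find?
                  (fun j => (body.getD j ' ' == ',' || body.getD j ' ' == ' ')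
                    && safe.getD j false) := by
            rw [hq1, hbcnew, if_neg hnotc]
          rw [if_neg hupd]
          rw [ih (i+1) (start+sp) _ _ _ (by omega) (by omega) (by omega) (by omega)
            hbs2 hbc2]
          rw [List.drop_drop, List.drop_drop]
          simp [Nat.add_comm]
      · -- no cut
        rw [Bool.not_eq_true] at hcut
        simp only [hcut, Bool.false_eq_true, if_false]
        have hieq : i - start < 66 := by
          have hne : i - start ≠ 66 := by
            intro he; rw [he] at hcut; simp at hcut
          omega
        have hbsnew := windowS_succ safe start i hsi
        have hbcnew := windowC_succ body safe start i hsi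
        by_cases hupd : (safe.getD i false && decide (1 ≤ i - start)) = true
        · have hbs2 : (some i : Option Nat)
              = (List.range' (start+1) (i + 1 - (start+1))).reverse.find?
                  (fun j => safe.getD j false) := by
            rw [hbsnew, if_pos hupd]
          have hbc2 : (if (body.getD i ' ' == ',' || body.getD i ' ' == ' ')
                && decide (36 ≤ i - start) then some i
                else (List.range' (start+36) (i - (start+36))).reverse.find?
                  (fun j => (body.getD j ' ' == ',' || body.getD j ' ' == ' ')
                    && safe.getD j false))
              = (List.range' (start+36) (i + 1 - (start+36))).reverse.find?
                  (fun j => (body.getD j ' ' == ',' || body.getD j ' ' == ' ')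
                    && safe.getD j false) := by
            rw [hbcnew]
            by_cases hc : ((body.getD i ' ' == ',' || body.getD i ' ' == ' ')
                && decide (36 ≤ i - start)) = true
            · rw [if_pos hc, if_pos (by
                rw [hc, Bool.true_and]; exact (Bool.and_eq_true_iff.mp hupd).1)]
            · rw [if_neg hc, if_neg (fun hcon => hc (Bool.and_eq_true_iff.mp hcon).1)]
          rw [if_pos hupd]
          exact ih (i+1) start _ _ _ (by omega) (by omega) (by omega) (by omega)
            hbs2 hbc2
        · have hbs2 : ((List.range' (start+1) (i - (start+1))).reverse.find?
                  (fun j => safe.getD j false) : Option Nat)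
              = (List.range' (start+1) (i + 1 - (start+1))).reverse.find?
                  (fun j => safe.getD j false) := by
            rw [hbsnew, if_neg hupd]
          have hnotc : ¬ (((body.getD i ' ' == ',' || body.getD i ' ' == ' ')
                && decide (36 ≤ i - start)) && safe.getD i false) = true := by
            intro hcon
            rcases Bool.and_eq_true_iff.mp hcon with ⟨h1, h2⟩
            rcases Bool.and_eq_true_iff.mp h1 with ⟨_, h3⟩
            have h4 : 36 ≤ i - start := of_decide_eq_true h3
            exact hupd (Bool.and_eq_true_iff.mpr ⟨h2, decide_eq_true (by omega)⟩)
          have hbc2 : ((List.range' (start+36) (i - (start+36))).reverse.find?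
                  (fun j => (body.getD j ' ' == ',' || body.getD j ' ' == ' ')
                    && safe.getD j false) : Option Nat)
              = (List.range' (start+36) (i + 1 - (start+36))).reverse.find?
                  (fun j => (body.getD j ' ' == ',' || body.getD j ' ' == ' ')
                    && safe.getD j false) := by
            rw [hbcnew, if_neg hnotc]
          rw [if_neg hupd]
          exact ih (i+1) start _ _ _ (by omega) (by omega) (by omega) (by omega)
            hbs2 hbc2
    · rw [pvLoopB.eq_def, dif_neg h, pvChunksA, dif_neg (by simp; omega)]

-- ===== VERDICT (by name: the statement is the Claim_ definition above) =====
theorem reformat_fixed_line_spec : Claim_equal_reformat_fixed_line := by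
  intro line cont_char _
  unfold Spec_reformat_fixed_line reformat_fixed_line reformat_fixed_line_alt
  have hguard : pvIsCommentLine line.toList
      = (!line.toList.isEmpty && (['C', 'c', '*', '!'].contains (line.toList.headD ' '))) := by
    cases line.toList with
    | nil => rfl
    | cons c t =>
      simp only [pvIsCommentLine, List.headD_cons, List.isEmpty_cons, Bool.not_false,
        Bool.true_and]
      simp [List.contains, List.elem]
      cases hC : c == 'C' <;> cases hc : c == 'c' <;> cases hs : c == '*' <;>
        cases hb : c == '!' <;> simp
  have hmask : pvMaskA (line.toList.drop 6)
        (List.replicate (line.toList.drop 6).length true) false ' ' 0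
      = pvMaskB (line.toList.drop 6) false ' ' false := by
    have h := maskA_eq_maskB (line.toList.drop 6) (line.toList.drop 6).length 0
      (List.replicate (line.toList.drop 6).length true) false ' ' (by omega) (by simp) (by simp)
    simpa using h
  have hchunks : pvLoopB (line.toList.drop 6) (pvMaskB (line.toList.drop 6) false ' ' false)
        0 0 none none []
      = pvChunksA (line.toList.drop 6) (pvMaskB (line.toList.drop 6) false ' ' false) := by
    have h := loopB_eq_chunksA (line.toList.drop 6)
      (pvMaskB (line.toList.drop 6) false ' ' false)
      (line.toList.drop 6).length 0 0 none none [] (by omega) (by omega) (by omega) (by omega)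
      (by simp) (by simp)
    simpa using h
  simp only [hguard, hmask, hchunks]
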